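-- pv_equiv track=rewrite | github.com/ChampionTej05/LeetCodeChallenges | four_number_sum.py | four_number_sum_non_duplicate
-- ===== SOURCE A (Python) =====
-- def four_number_sum_non_duplicate(nums, target):
--
--     result = []
--     n = len(nums)
--
--     for i in range(n):
--         # Avoid duplicate values for the first number
--         if i > 0 and nums[i] == nums[i - 1]:
--             continue
--
--         for j in range(i + 1, n):
--             # Avoid duplicate values for the second number
--             if j > i + 1 and nums[j] == nums[j - 1]:
--                 continue
--
--             left, right = j + 1, n - 1
--             while left < right:
--                 sum = nums[i] + nums[j] + nums[left] + nums[right]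
--                 if sum == target:
--                     result.append([nums[i], nums[j], nums[left], nums[right]])
--
--                     # Skip duplicates for the third and fourth numbers
--                     while left < right and nums[left] == nums[left + 1]:
--                         left += 1
--                     while left < right and nums[right] == nums[right - 1]:
--                         right -= 1
--
--                     left += 1
--                     right -= 1
--                 elif sum < target:
--                     left += 1
--                 else:
--                     right -= 1
--
--     return result
-- ===== SOURCE B (Python) =====
-- def four_number_sum_non_duplicate(nums, target):
--     n = len(nums)
--
--     def two_sum(start, t):
--         res = []
--         left, right = start, n - 1
--         while left < right:
--             s = nums[left] + nums[right]
--             if s == t: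
--                 res.append([nums[left], nums[right]])
--                 while left < right and nums[left] == nums[left + 1]:
--                     left += 1
--                 while left < right and nums[right] == nums[right - 1]:
--                     right -= 1
--                 left += 1
--                 right -= 1
--             elif s < t:
--                 left += 1
--             else:
--                 right -= 1
--         return res
--
--     def k_sum(start, k, t):
--         if k == 2:
--             return two_sum(start, t)
--         res = []
--         for i in range(start, n):
--             if i > start and nums[i] == nums[i - 1]:
--                 continue
--             for rest in k_sum(i + 1, k - 1, t - nums[i]):
--                 res.append([nums[i]] + rest)
--         return res
--
--     return k_sum(0, 4, target)
-- ===== Notes on version B (the rewrite author's own statement) =====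
-- stated objective: alternative
-- what changed: A's hard-coded two nested index loops over the first two numbers are replaced by a recursive generalized kSum(start, k, target) helper that prepends nums[i] to each (k-1)-tuple of the recursive call, bottoming out in the same two-pointer scan.
import Mathlib
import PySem

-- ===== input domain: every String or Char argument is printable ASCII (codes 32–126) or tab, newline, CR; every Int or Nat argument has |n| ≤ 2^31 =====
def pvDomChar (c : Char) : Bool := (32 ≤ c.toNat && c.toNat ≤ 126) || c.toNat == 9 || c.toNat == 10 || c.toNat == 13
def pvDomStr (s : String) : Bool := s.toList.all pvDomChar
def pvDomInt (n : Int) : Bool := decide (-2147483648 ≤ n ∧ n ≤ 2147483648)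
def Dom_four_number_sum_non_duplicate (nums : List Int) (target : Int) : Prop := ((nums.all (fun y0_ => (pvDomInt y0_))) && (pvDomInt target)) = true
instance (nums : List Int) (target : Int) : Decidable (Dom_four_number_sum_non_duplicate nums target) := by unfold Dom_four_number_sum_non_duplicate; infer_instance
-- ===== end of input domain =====

-- B replaces A's hard-coded pair of nested index loops by a recursive generalized kSum
-- decomposition (same asymptotic cost, objective 'alternative'); return values are identical.

-- ===== PORT A =====
-- the inner duplicate-skip whiles, shared verbatim by both Pythons' two-pointer scans
def skipL (nums : List Int) (left right : Nat) : Nat :=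
  if left < right ∧ nums.getD left 0 = nums.getD (left + 1) 0 then
    skipL nums (left + 1) right
  else left
termination_by right - left

def skipR (nums : List Int) (left right : Nat) : Nat :=
  if left < right ∧ nums.getD right 0 = nums.getD (right - 1) 0 then
    skipR nums left (right - 1)
  else right
termination_by right - left

-- bounds on the skip loops, cited by the two-pointer loops' decreasing_by
theorem skipL_ge (nums : List Int) : ∀ left right, left ≤ skipL nums left right := by
  intro l r
  fun_induction skipL nums l r <;> omega

theorem skipR_le (nums : List Int) : ∀ left right, skipR nums left right ≤ right := by
  intro l r
  fun_induction skipR nums l r <;> omega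

-- A's while loop, with the result accumulator threaded exactly as Python's `result`
def twoLoop (nums : List Int) (target : Int) (i j : Nat) (left right : Nat)
    (acc : List (List Int)) : List (List Int) :=
  if h : left < right then
    let s := nums.getD i 0 + nums.getD j 0 + nums.getD left 0 + nums.getD right 0
    if s = target then
      let l' := skipL nums left right
      let r' := skipR nums l' right
      twoLoop nums target i j (l' + 1) (r' - 1)
        (acc ++ [[nums.getD i 0, nums.getD j 0, nums.getD left 0, nums.getD right 0]])
    else if s < target then
      twoLoop nums target i j (left + 1) right acc
    else
      twoLoop nums target i j left (right - 1) acc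
  else acc
termination_by right - left
decreasing_by
  · have h1 := skipL_ge nums left right
    have h3 := skipR_le nums (skipL nums left right) right
    omega
  · omega
  · omega

def jLoop (nums : List Int) (target : Int) (i j : Nat) (acc : List (List Int)) :
    List (List Int) :=
  if j < nums.length then
    if i + 1 < j ∧ nums.getD j 0 = nums.getD (j - 1) 0 then
      jLoop nums target i (j + 1) acc
    else
      jLoop nums target i (j + 1) (twoLoop nums target i j (j + 1) (nums.length - 1) acc)
  else acc
termination_by nums.length - j

def iLoop (nums : List Int) (target : Int) (i : Nat) (acc : List (List Int)) :
    List (List Int) :=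
  if i < nums.length then
    if 0 < i ∧ nums.getD i 0 = nums.getD (i - 1) 0 then
      iLoop nums target (i + 1) acc
    else
      iLoop nums target (i + 1) (jLoop nums target i (i + 1) acc)
  else acc
termination_by nums.length - i

def four_number_sum_non_duplicate (nums : List Int) (target : Int) : List (List Int) :=
  iLoop nums target 0 []

-- ===== PORT B =====
-- two_sum: the base-case two-pointer scan, returning its pair list directly
def bTwo (nums : List Int) (t : Int) (left right : Nat) : List (List Int) :=
  if h : left < right then
    let s := nums.getD left 0 + nums.getD right 0
    if s = t then
      let l' := skipL nums left right
      let r' := skipR nums l' right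
      [nums.getD left 0, nums.getD right 0] :: bTwo nums t (l' + 1) (r' - 1)
    else if s < t then
      bTwo nums t (left + 1) right
    else
      bTwo nums t left (right - 1)
  else []
termination_by right - left
decreasing_by
  · have h1 := skipL_ge nums left right
    have h3 := skipR_le nums (skipL nums left right) right
    omega
  · omega
  · omega

-- k_sum: recursive generalized kSum; bKLoop is its `for i in range(start, n)` loop
mutual
def bKSum (nums : List Int) (startIdx k : Nat) (t : Int) : List (List Int) :=
  if k = 2 then bTwo nums t startIdx (nums.length - 1)
  else bKLoop nums startIdx k startIdx t
termination_by (k, nums.length + 1 - startIdx, 1)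
decreasing_by
  apply Prod.Lex.right
  apply Prod.Lex.right
  omega

def bKLoop (nums : List Int) (startIdx k : Nat) (i : Nat) (t : Int) : List (List Int) :=
  if i < nums.length then
    if startIdx < i ∧ nums.getD i 0 = nums.getD (i - 1) 0 then
      bKLoop nums startIdx k (i + 1) t
    else
      ((bKSum nums (i + 1) (k - 1) (t - nums.getD i 0)).map
        (fun rest => nums.getD i 0 :: rest)) ++ bKLoop nums startIdx k (i + 1) t
  else []
termination_by (k, nums.length + 1 - i, 0)
decreasing_by
  · apply Prod.Lex.right
    apply Prod.Lex.left
    omega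
  · rcases Nat.eq_zero_or_pos k with hk | hk
    · subst hk
      apply Prod.Lex.right
      apply Prod.Lex.left
      omega
    · apply Prod.Lex.left
      omega
  · apply Prod.Lex.right
    apply Prod.Lex.left
    omega
end

def four_number_sum_non_duplicate_alt (nums : List Int) (target : Int) : List (List Int) :=
  bKSum nums 0 4 target

-- ===== PRECONDITION & SPEC =====
def Spec_four_number_sum_non_duplicate (nums : List Int) (target : Int) (out : List (List Int)) : Prop := out = four_number_sum_non_duplicate_alt nums target
instance (nums : List Int) (target : Int) (out : List (List Int)) : Decidable (Spec_four_number_sum_non_duplicate nums target out) := by unfold Spec_four_number_sum_non_duplicate; infer_instance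

-- ===== CLAIM (what is proved, stated in full; the proofs are below) =====
def Claim_equal_four_number_sum_non_duplicate : Prop := ∀ (nums : List Int) (target : Int), Dom_four_number_sum_non_duplicate nums target → Spec_four_number_sum_non_duplicate nums target (four_number_sum_non_duplicate nums target)

-- ===== LEMMAS AND PROOFS =====
theorem twoLoop_eq (nums : List Int) (target : Int) (i j : Nat) :
    ∀ left right acc, twoLoop nums target i j left right acc
      = acc ++ (bTwo nums (target - nums.getD i 0 - nums.getD j 0) left right).map
          (fun p => nums.getD i 0 :: nums.getD j 0 :: p) := by
  intro l r acc
  fun_induction twoLoop nums target i j l r acc with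
  | case1 l r acc h s hs l' r' ih =>
    have hs' : nums.getD l 0 + nums.getD r 0 = target - nums.getD i 0 - nums.getD j 0 := by
      simp only [s] at hs; omega
    conv_rhs => rw [bTwo]
    simp only [dif_pos h, if_pos hs']
    rw [ih]
    simp [l', r']
  | case2 l r acc h s hs hlt ih =>
    have h1 : ¬ (nums.getD l 0 + nums.getD r 0 = target - nums.getD i 0 - nums.getD j 0) := by
      simp only [s] at hs; omega
    have h2 : nums.getD l 0 + nums.getD r 0 < target - nums.getD i 0 - nums.getD j 0 := by
      simp only [s] at hlt; omega
    conv_rhs => rw [bTwo]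
    simp only [dif_pos h, if_neg h1, if_pos h2]
    exact ih
  | case3 l r acc h s hs hlt ih =>
    have h1 : ¬ (nums.getD l 0 + nums.getD r 0 = target - nums.getD i 0 - nums.getD j 0) := by
      simp only [s] at hs; omega
    have h2 : ¬ (nums.getD l 0 + nums.getD r 0 < target - nums.getD i 0 - nums.getD j 0) := by
      simp only [s] at hlt; omega
    conv_rhs => rw [bTwo]
    simp only [dif_pos h, if_neg h1, if_neg h2]
    exact ih
  | case4 l r acc h =>
    conv_rhs => rw [bTwo]
    simp [h]

theorem jLoop_eq (nums : List Int) (target : Int) (i : Nat) :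
    ∀ j acc, jLoop nums target i j acc
      = acc ++ (bKLoop nums (i + 1) 3 j (target - nums.getD i 0)).map
          (fun r => nums.getD i 0 :: r) := by
  intro j acc
  fun_induction jLoop nums target i j acc with
  | case1 j acc hj hdup ih =>
    rw [ih]
    conv_rhs => rw [bKLoop.eq_def]
    simp only [if_pos hj, if_pos hdup]
  | case2 j acc hj hdup ih =>
    rw [ih, twoLoop_eq]
    conv_rhs => rw [bKLoop.eq_def]
    simp only [if_pos hj, if_neg hdup]
    rw [bKSum.eq_def]
    simp [List.map_map, Function.comp]
  | case3 j acc hj =>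
    conv_rhs => rw [bKLoop.eq_def]
    simp [hj]

theorem iLoop_eq (nums : List Int) (target : Int) :
    ∀ i acc, iLoop nums target i acc = acc ++ bKLoop nums 0 4 i target := by
  intro i acc
  fun_induction iLoop nums target i acc with
  | case1 i acc hi hdup ih =>
    rw [ih]
    conv_rhs => rw [bKLoop.eq_def]
    simp only [if_pos hi, if_pos hdup]
  | case2 i acc hi hdup ih =>
    rw [ih, jLoop_eq]
    conv_rhs => rw [bKLoop.eq_def]
    simp only [if_pos hi, if_neg hdup]
    rw [bKSum.eq_def]
    simp
  | case3 i acc hi =>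
    conv_rhs => rw [bKLoop.eq_def]
    simp [hi]

-- ===== VERDICT (by name: the statement is the Claim_ definition above) =====
theorem four_number_sum_non_duplicate_spec : Claim_equal_four_number_sum_non_duplicate := by
  intro nums target _
  unfold Spec_four_number_sum_non_duplicate four_number_sum_non_duplicate
    four_number_sum_non_duplicate_alt
  rw [iLoop_eq, bKSum.eq_def]
  simp
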